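-- pv_equiv track=rewrite | github.com/Ultimagen/ugbio-utils | src/cnv/ugbio_cnv/pileuptofreq.py | pileup_to_freq
-- ===== SOURCE A (Python) =====
-- from collections import defaultdict
--
-- PILEUP_IGNORE   = {",", ".", "*", "#", ">", "<"}
--
-- USE_STARTEND    = True
--
-- def pileup_to_freq(reference : str, pileup : str) -> (int):
--     """ Counts A, C, G, T, In, Del occurence given a samtools pileup string"""
--
--     pileup      = pileup.upper()
--     frequencies = defaultdict(int)
--     is_indel   = False
--     indel_pos  = 0
--     indel_size = ""
--
--     is_start   = 0
--     last_base  = ""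
--
--     for k in pileup:
--
--         if k in ("+", "-"):
--             is_indel    = True
--             indel_pos   = 0
--             indel_size  = ""
--             indel       = k
--             continue
--
--         if k == "$":
--             frequencies[last_base] -= not USE_STARTEND
--             continue
--
--         # Handle first base in read; Indels would come after (^)(QUAL)(BASE) structure
--         if k == "^":
--             is_start = 1
--             continue
--         if is_start > 0:
--             if is_start < 2:
--                 is_start += 1
--             elif is_start == 2:
--                 frequencies[k] += USE_STARTEND
--                 is_start = 0
--             continue
--
--         if is_indel:
--             is_digit = str.isdigit(k)
--             if is_digit:
--                 indel_size += k
--                 continue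
--             indel_pos += 1
--             indel += k
--             if indel_pos == int(indel_size):
--                 frequencies[indel] += 1
--                 is_indel = False
--                 indel_pos = 0
--             continue
--
--         last_base = k
--         frequencies[k] += 1
--
--     frequencies[reference] += frequencies[","] + frequencies["."]
--     frequencies["Deletion"] = frequencies["*"] + frequencies["#"]
--
--     return {k : v for k, v in frequencies.items() if v > 0 and k not in PILEUP_IGNORE}
-- ===== SOURCE B (Python) =====
-- PILEUP_IGNORE = {",", ".", "*", "#", ">", "<"}
--
-- USE_STARTEND = True
--
-- def pileup_to_freq(reference: str, pileup: str) -> (int):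
--     """Counts A, C, G, T, In, Del occurrence given a samtools pileup string
--     (index-driven scan instead of a per-character flag state machine)."""
--     s = pileup.upper()
--     freq = {}
--     i, n = 0, len(s)
--     while i < n:
--         c = s[i]
--         if c in ("+", "-"):
--             j = i + 1
--             while j < n and s[j].isdigit():
--                 j += 1
--             size = int(s[i + 1:j])          # ValueError on a size-less indel, as in the flag machine
--             token = c + s[j:j + size]
--             freq[token] = freq.get(token, 0) + 1
--             i = j + size
--         elif c == "$":
--             i += 1                           # end-of-read mark: counts nothing
--         elif c == "^":
--             if i + 2 < n:
--                 b = s[i + 2]                 # skip the quality char, count the start base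
--                 freq[b] = freq.get(b, 0) + 1
--             i += 3
--         else:
--             freq[c] = freq.get(c, 0) + 1
--             i += 1
--     freq[reference] = freq.get(reference, 0) + freq.get(",", 0) + freq.get(".", 0)
--     freq["Deletion"] = freq.get("*", 0) + freq.get("#", 0)
--     return {k: v for k, v in freq.items() if v > 0 and k not in PILEUP_IGNORE}
-- ===== Notes on version B (the rewrite author's own statement) =====
-- stated objective: idiomatic
-- what changed: Replaces A's per-character flag state machine (is_indel/indel_pos/indel_size/is_start/last_base carried across iterations) by an index-driven scan that consumes each pileup token (indel with its digit count and bases, '$', '^'+qual+base, plain base) in one step, and a plain dict with get() instead of a defaultdict.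
-- outside the precondition, e.g. on pileup_to_freq('A', '+2A3C'): A returns {}, B returns {'+A3': 1, 'C': 1}; on pileup_to_freq('A', '^+1A'): A returns {'A': 1}, B returns {'1': 1, 'A': 1}; on pileup_to_freq('A', '+12'): A returns {}, B returns {'+': 1}
import Mathlib
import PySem

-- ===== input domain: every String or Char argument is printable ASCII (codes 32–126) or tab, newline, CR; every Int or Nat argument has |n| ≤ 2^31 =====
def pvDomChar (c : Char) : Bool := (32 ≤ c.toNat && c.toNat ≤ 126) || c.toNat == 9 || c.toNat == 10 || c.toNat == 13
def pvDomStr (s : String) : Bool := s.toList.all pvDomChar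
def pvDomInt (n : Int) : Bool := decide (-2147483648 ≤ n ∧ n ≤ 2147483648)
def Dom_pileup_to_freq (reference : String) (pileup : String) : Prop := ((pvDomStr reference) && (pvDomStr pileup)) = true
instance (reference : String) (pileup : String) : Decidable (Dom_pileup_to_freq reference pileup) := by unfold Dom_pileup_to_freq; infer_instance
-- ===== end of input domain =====

-- B replaces A's per-character flag state machine by an index-driven scan that consumes each
-- pileup token (indel, '$', '^'+qual+base, plain base) in one step; equivalence is proved on
-- grammatically well-formed pileup strings (Pre_).

def pvIgnore : List String := [",", ".", "*", "#", ">", "<"]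

def pvUseStartEnd : Bool := true

-- ===== PORT A =====
structure PvStA where
  d : PySem.Dict String Int
  isIndel : Bool
  indelPos : Int
  indelSize : List Char
  indel : List Char
  isStart : Int
  lastBase : String

def pvStepA (s : PvStA) (k : Char) : PvStA :=
  if k = '+' ∨ k = '-' then
    { s with isIndel := true, indelPos := 0, indelSize := [], indel := [k] }
  else if k = '$' then
    let d := s.d.setdefault s.lastBase 0
    { s with d := d.insert s.lastBase (d.getD s.lastBase 0 - (if pvUseStartEnd then 0 else 1)) }
  else if k = '^' then
    { s with isStart := 1 }
  else if s.isStart > 0 then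
    if s.isStart < 2 then { s with isStart := s.isStart + 1 }
    else if s.isStart = 2 then
      let key := String.ofList [k]
      let d := s.d.setdefault key 0
      { s with d := d.insert key (d.getD key 0 + (if pvUseStartEnd then 1 else 0)), isStart := 0 }
    else s
  else if s.isIndel then
    if PySem.Chars.isdigit k then { s with indelSize := s.indelSize ++ [k] }
    else
      let pos := s.indelPos + 1
      let ind := s.indel ++ [k]
      -- `int(indel_size)` raises ValueError when indel_size is empty: those inputs are outside
      -- Pre_; the failed comparison models the raise-free path only.
      if some pos = PySem.Int.ofChars? s.indelSize then
        let key := String.ofList ind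
        let d := s.d.setdefault key 0
        { s with d := d.insert key (d.getD key 0 + 1), isIndel := false, indelPos := 0, indel := ind }
      else { s with indelPos := pos, indel := ind }
  else
    let key := String.ofList [k]
    let d := s.d.setdefault key 0
    { s with d := d.insert key (d.getD key 0 + 1), lastBase := key }

def pileup_to_freq (reference : String) (pileup : String) : List (String × Int) :=
  let st := (PySem.Str.upper pileup).toList.foldl pvStepA ⟨PySem.Dict.empty, false, 0, [], [], 0, ""⟩
  let d1 := st.d.setdefault reference 0
  let d2 := d1.setdefault "," 0
  let d3 := d2.setdefault "." 0
  let d4 := d3.insert reference (d1.getD reference 0 + d2.getD "," 0 + d3.getD "." 0)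
  let d5 := d4.setdefault "*" 0
  let d6 := d5.setdefault "#" 0
  let d7 := d6.insert "Deletion" (d5.getD "*" 0 + d6.getD "#" 0)
  d7.items.filter (fun kv => decide (0 < kv.2) && !(pvIgnore.contains kv.1))

-- ===== PORT B =====
def pvCount (d : PySem.Dict String Int) (k : String) : PySem.Dict String Int :=
  d.insert k (d.getD k 0 + 1)

-- Source B's `while i < n` loop; the Nat fuel (= remaining length, always sufficient) only makes it total.
def pvLoopB : Nat → List Char → PySem.Dict String Int → PySem.Dict String Int
  | _, [], d => d
  | 0, _ :: _, d => d
  | n + 1, c :: rest, d =>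
    if c = '+' ∨ c = '-' then
      let ds := rest.takeWhile PySem.Chars.isdigit
      match PySem.Int.ofChars? ds with
      | none => d      -- Python B raises ValueError here (outside Pre_)
      | some v =>
        let body := (rest.drop ds.length).take v.toNat
        pvLoopB n (rest.drop (ds.length + v.toNat)) (pvCount d (String.ofList (c :: body)))
    else if c = '$' then pvLoopB n rest d
    else if c = '^' then
      match rest with
      | _q :: b :: rest' => pvLoopB n rest' (pvCount d (String.ofList [b]))
      | _ => d
    else pvLoopB n rest (pvCount d (String.ofList [c]))

def pileup_to_freq_alt (reference : String) (pileup : String) : List (String × Int) :=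
  let cs := (PySem.Str.upper pileup).toList
  let d := pvLoopB cs.length cs PySem.Dict.empty
  let e1 := d.insert reference (d.getD reference 0 + d.getD "," 0 + d.getD "." 0)
  let e2 := e1.insert "Deletion" (e1.getD "*" 0 + e1.getD "#" 0)
  e2.items.filter (fun kv => decide (0 < kv.2) && !(pvIgnore.contains kv.1))

-- ===== PRECONDITION & SPEC =====
def pvPlain (c : Char) : Bool := !(c = '+' || c = '-' || c = '$' || c = '^')

-- Grammar of a well-formed (uppercased) pileup string; the Nat fuel (= remaining length,
-- always sufficient) only makes the recursion structural.
def pvWfGo : Nat → Bool → List Char → Bool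
  | _, _, [] => true
  | 0, _, _ :: _ => false
  | n + 1, seen, c :: rest =>
    if c = '+' ∨ c = '-' then
      match PySem.Int.ofChars? (rest.takeWhile PySem.Chars.isdigit) with
      | none => false
      | some v =>
        let ds := rest.takeWhile PySem.Chars.isdigit
        let body := (rest.drop ds.length).take v.toNat
        decide (0 < v) && decide (body.length = v.toNat) &&
          body.all (fun b => pvPlain b && !PySem.Chars.isdigit b) &&
          pvWfGo n seen (rest.drop (ds.length + v.toNat))
    else if c = '$' then seen && pvWfGo n seen rest
    else if c = '^' then
      match rest with
      | q :: b :: rest' => pvPlain q && pvPlain b && pvWfGo n seen rest'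
      | [q] => !(q == '$')
      | [] => true
    else pvWfGo n true rest

-- Pre_ admits only grammatically well-formed pileup strings (each '+'/'-' carries a positive
-- digit count followed by exactly that many ordinary non-digit bases, '^' is followed by a
-- quality char and a base neither of which is '+','-','$','^', and '$' only follows some base);
-- on malformed strings A either raises ValueError (int('')) or returns accidental leftover-state
-- values that are no more canonical than B's token reading.
def Pre_pileup_to_freq (reference : String) (pileup : String) : Prop :=
  pvWfGo (PySem.Str.upper pileup).toList.length false (PySem.Str.upper pileup).toList = true
instance (reference : String) (pileup : String) : Decidable (Pre_pileup_to_freq reference pileup) := by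
  unfold Pre_pileup_to_freq; infer_instance

def pvWitness_pileup_to_freq : String × String := ("C", ".,aCg^FT$*#-1a+2GT")

def Spec_pileup_to_freq (reference : String) (pileup : String) (out : List (String × Int)) : Prop :=
  out = pileup_to_freq_alt reference pileup
instance (reference : String) (pileup : String) (out : List (String × Int)) :
    Decidable (Spec_pileup_to_freq reference pileup out) := by unfold Spec_pileup_to_freq; infer_instance

-- ===== CLAIM (what is proved, stated in full; the proofs are below) =====
def Claim_equal_pileup_to_freq : Prop := ∀ (reference : String) (pileup : String), Dom_pileup_to_freq reference pileup → Pre_pileup_to_freq reference pileup → Spec_pileup_to_freq reference pileup (pileup_to_freq reference pileup)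

-- ===== LEMMAS AND PROOFS =====
theorem pv_witness_ok :
    Dom_pileup_to_freq pvWitness_pileup_to_freq.1 pvWitness_pileup_to_freq.2 ∧
    Pre_pileup_to_freq pvWitness_pileup_to_freq.1 pvWitness_pileup_to_freq.2 := by decide

def pvP : String × Int → Bool := fun kv => decide (0 < kv.2) && !(pvIgnore.contains kv.1)

theorem pv_setdefault_insert_same (d : PySem.Dict String Int) (k : String) (w v : Int) :
    (d.setdefault k w).insert k v = d.insert k v := by
  by_cases h : d.contains k = true
  · rw [PySem.Dict.setdefault_of_contains d w h]
  · rw [PySem.Dict.setdefault_of_not_contains d w (by simpa using h), PySem.Dict.insert_insert_self]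

theorem pv_getD_setdefault_zero (d : PySem.Dict String Int) (a k : String) :
    (d.setdefault a 0).getD k 0 = d.getD k 0 := by
  by_cases h : k = a
  · subst h; rw [PySem.Dict.getD_setdefault_self]
  · rw [PySem.Dict.getD_eq_get?_getD, PySem.Dict.get?_setdefault_of_ne d 0 h,
      ← PySem.Dict.getD_eq_get?_getD]

theorem pv_touch_add (d : PySem.Dict String Int) (k : String) (x : Int) :
    (d.setdefault k 0).insert k ((d.setdefault k 0).getD k 0 + x) = d.insert k (d.getD k 0 + x) := by
  rw [pv_getD_setdefault_zero, pv_setdefault_insert_same]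

theorem pv_insert_getD_self (d : PySem.Dict String Int) (k : String)
    (h : d.contains k = true) (hnd : d.keys.Nodup) :
    d.insert k (d.getD k 0) = d := by
  apply PySem.Dict.ext
  rw [PySem.Dict.items_insert_of_contains d _ h]
  have hfix : ∀ p ∈ d.items, (if p.1 == k then (k, d.getD k 0) else p) = p := by
    intro p hp
    by_cases hk : p.1 = k
    · have hv : d.getD k 0 = p.2 := by
        have hm : (k, p.2) ∈ d.items := by rw [← hk]; exact hp
        exact PySem.Dict.getD_of_mem_items d hm hnd 0
      simp only [hk, beq_self_eq_true, if_true, hv]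
      rw [← hk]
    · simp [hk]
  simpa using List.map_congr_left hfix

theorem pv_pvP_zero (a : String) : pvP (a, 0) = false := by simp [pvP]

theorem pvG (d : PySem.Dict String Int) (a k : String) (v : Int) :
    ((d.setdefault a 0).insert k v).items.filter pvP = ((d.insert k v)).items.filter pvP := by
  by_cases ha : d.contains a = true
  · rw [PySem.Dict.setdefault_of_contains d 0 ha]
  · have ha' : d.contains a = false := by simpa using ha
    rw [PySem.Dict.setdefault_of_not_contains d 0 ha']
    by_cases hak : a = k
    · subst hak; rw [PySem.Dict.insert_insert_self]
    · by_cases hk : d.contains k = true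
      · have hk2 : (d.insert a 0).contains k = true := by
          rw [PySem.Dict.contains_insert]; simp [hk]
        rw [PySem.Dict.items_insert_of_contains _ _ hk2,
          PySem.Dict.items_insert_of_not_contains d 0 ha',
          PySem.Dict.items_insert_of_contains d v hk,
          List.map_append, List.filter_append]
        have : ((a, (0 : Int)).1 == k) = false := by simpa using hak
        simp [this, hak, pv_pvP_zero]
      · have hk' : d.contains k = false := by simpa using hk
        have hk2 : (d.insert a 0).contains k = false := by
          rw [PySem.Dict.contains_insert]; simp [hk', Ne.symm hak]
        rw [PySem.Dict.items_insert_of_not_contains _ v hk2,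
          PySem.Dict.items_insert_of_not_contains d 0 ha',
          PySem.Dict.items_insert_of_not_contains d v hk',
          List.append_assoc, List.filter_append, List.filter_append, List.filter_append]
        simp [pv_pvP_zero]

theorem pvG2 (d : PySem.Dict String Int) (b k k' : String) (v v' : Int) (hbk' : b ≠ k') :
    (((d.setdefault b 0).insert k v).insert k' v').items.filter pvP
      = (((d.insert k v)).insert k' v').items.filter pvP := by
  by_cases hb : d.contains b = true
  · rw [PySem.Dict.setdefault_of_contains d 0 hb]
  · have hb' : d.contains b = false := by simpa using hb
    rw [PySem.Dict.setdefault_of_not_contains d 0 hb']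
    by_cases hbk : b = k
    · subst hbk; rw [PySem.Dict.insert_insert_self]
    · have hbeqk : (b == k) = false := by simpa using hbk
      have hbeqk' : (b == k') = false := by simpa using hbk'
      by_cases hk : d.contains k = true
      · have hk2 : (d.insert b 0).contains k = true := by
          rw [PySem.Dict.contains_insert]; simp [hk]
        by_cases hk' : ((d.insert k v).contains k') = true
        · have hk'2 : (((d.insert b 0).insert k v)).contains k' = true := by
            rw [PySem.Dict.contains_insert] at hk'
            rw [PySem.Dict.contains_insert, PySem.Dict.contains_insert]
            simp only [Bool.or_eq_true] at hk' ⊢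
            rcases hk' with h | h
            · exact Or.inl h
            · exact Or.inr (Or.inr h)
          rw [PySem.Dict.items_insert_of_contains _ v' hk'2,
            PySem.Dict.items_insert_of_contains _ v' hk',
            PySem.Dict.items_insert_of_contains _ v hk2,
            PySem.Dict.items_insert_of_not_contains d 0 hb',
            PySem.Dict.items_insert_of_contains d v hk]
          simp [List.map_append, List.filter_append, hbeqk, hbeqk', hbk, hbk', pv_pvP_zero]
        · have hk'1 : ((d.insert k v).contains k') = false := by simpa using hk'
          have hk'2 : (((d.insert b 0).insert k v)).contains k' = false := by
            rw [PySem.Dict.contains_insert] at hk'1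
            rw [PySem.Dict.contains_insert, PySem.Dict.contains_insert]
            simp only [Bool.or_eq_false_iff] at hk'1 ⊢
            exact ⟨hk'1.1, by simpa using Ne.symm hbk', hk'1.2⟩
          rw [PySem.Dict.items_insert_of_not_contains _ v' hk'2,
            PySem.Dict.items_insert_of_not_contains _ v' hk'1,
            PySem.Dict.items_insert_of_contains _ v hk2,
            PySem.Dict.items_insert_of_not_contains d 0 hb',
            PySem.Dict.items_insert_of_contains d v hk]
          simp [List.map_append, List.filter_append, hbeqk, hbk, hbk', pv_pvP_zero]
      · have hk1 : d.contains k = false := by simpa using hk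
        have hk2 : (d.insert b 0).contains k = false := by
          rw [PySem.Dict.contains_insert]; simp [hk1, Ne.symm hbk]
        by_cases hk' : ((d.insert k v).contains k') = true
        · have hk'2 : (((d.insert b 0).insert k v)).contains k' = true := by
            rw [PySem.Dict.contains_insert] at hk'
            rw [PySem.Dict.contains_insert, PySem.Dict.contains_insert]
            simp only [Bool.or_eq_true] at hk' ⊢
            rcases hk' with h | h
            · exact Or.inl h
            · exact Or.inr (Or.inr h)
          rw [PySem.Dict.items_insert_of_contains _ v' hk'2,
            PySem.Dict.items_insert_of_contains _ v' hk',
            PySem.Dict.items_insert_of_not_contains _ v hk2,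
            PySem.Dict.items_insert_of_not_contains d 0 hb',
            PySem.Dict.items_insert_of_not_contains d v hk1]
          simp [List.map_append, List.filter_append, hbeqk', hbk, hbk', pv_pvP_zero]
        · have hk'1 : ((d.insert k v).contains k') = false := by simpa using hk'
          have hk'2 : (((d.insert b 0).insert k v)).contains k' = false := by
            rw [PySem.Dict.contains_insert] at hk'1
            rw [PySem.Dict.contains_insert, PySem.Dict.contains_insert]
            simp only [Bool.or_eq_false_iff] at hk'1 ⊢
            exact ⟨hk'1.1, by simpa using Ne.symm hbk', hk'1.2⟩
          rw [PySem.Dict.items_insert_of_not_contains _ v' hk'2,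
            PySem.Dict.items_insert_of_not_contains _ v' hk'1,
            PySem.Dict.items_insert_of_not_contains _ v hk2,
            PySem.Dict.items_insert_of_not_contains d 0 hb',
            PySem.Dict.items_insert_of_not_contains d v hk1]
          simp [List.filter_append, hbk, hbk', pv_pvP_zero]

theorem pv_final (d : PySem.Dict String Int) (ref : String) :
    (let d1 := d.setdefault ref 0
     let d2 := d1.setdefault "," 0
     let d3 := d2.setdefault "." 0
     let d4 := d3.insert ref (d1.getD ref 0 + d2.getD "," 0 + d3.getD "." 0)
     let d5 := d4.setdefault "*" 0
     let d6 := d5.setdefault "#" 0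
     (d6.insert "Deletion" (d5.getD "*" 0 + d6.getD "#" 0)).items.filter pvP)
    = (let e1 := d.insert ref (d.getD ref 0 + d.getD "," 0 + d.getD "." 0)
       (e1.insert "Deletion" (e1.getD "*" 0 + e1.getD "#" 0)).items.filter pvP) := by
  dsimp only
  simp only [pv_getD_setdefault_zero, PySem.Dict.getD_insert]
  rw [pvG, pvG, pvG2 _ _ _ _ _ _ (by decide), pvG2 _ _ _ _ _ _ (by decide),
    pv_setdefault_insert_same]

theorem pv_isdigit_facts {c : Char} (hc : PySem.Chars.isdigit c = true) :
    ¬(c = '+' ∨ c = '-') ∧ ¬c = '$' ∧ ¬c = '^' := by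
  refine ⟨?_, ?_, ?_⟩
  · rintro (rfl | rfl) <;> exact absurd hc (by decide)
  · rintro rfl; exact absurd hc (by decide)
  · rintro rfl; exact absurd hc (by decide)

theorem pv_plain_facts {c : Char} (hc : pvPlain c = true) :
    ¬(c = '+' ∨ c = '-') ∧ ¬c = '$' ∧ ¬c = '^' := by
  simp only [pvPlain, Bool.not_eq_true', Bool.or_eq_false_iff, decide_eq_false_iff_not] at hc
  exact ⟨by rintro (rfl | rfl); exacts [hc.1.1.1 rfl, hc.1.1.2 rfl], hc.1.2, hc.2⟩

theorem pv_digits_fold (ds : List Char) (h : ∀ c ∈ ds, PySem.Chars.isdigit c = true) :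
    ∀ (d : PySem.Dict String Int) (sz ind : List Char) (lb : String),
    ds.foldl pvStepA ⟨d, true, 0, sz, ind, 0, lb⟩ = ⟨d, true, 0, sz ++ ds, ind, 0, lb⟩ := by
  induction ds with
  | nil => intro d sz ind lb; simp
  | cons c ds ih =>
    intro d sz ind lb
    have hc := h c (List.mem_cons_self ..)
    obtain ⟨h1, h2, h3⟩ := pv_isdigit_facts hc
    simp only [List.foldl_cons]
    rw [show pvStepA ⟨d, true, 0, sz, ind, 0, lb⟩ c = ⟨d, true, 0, sz ++ [c], ind, 0, lb⟩ by
      simp [pvStepA, h1, h2, h3, hc]]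
    rw [ih (fun c hm => h c (List.mem_cons_of_mem _ hm)) d (sz ++ [c]) ind lb]
    simp

theorem pv_body_fold (body : List Char) :
    ∀ (j v : Int) (d : PySem.Dict String Int) (sz ind : List Char) (lb : String),
    (∀ c ∈ body, pvPlain c = true ∧ PySem.Chars.isdigit c = false) →
    PySem.Int.ofChars? sz = some v →
    j + body.length = v → 0 ≤ j → body ≠ [] →
    body.foldl pvStepA ⟨d, true, j, sz, ind, 0, lb⟩ =
      ⟨pvCount d (String.ofList (ind ++ body)), false, 0, sz, ind ++ body, 0, lb⟩ := by
  induction body with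
  | nil => intro j v d sz ind lb _ _ _ _ hne; exact absurd rfl hne
  | cons c rest ih =>
    intro j v d sz ind lb hall hsz hlen hj _
    obtain ⟨hplain, hdig⟩ := hall c (List.mem_cons_self ..)
    obtain ⟨h1, h2, h3⟩ := pv_plain_facts hplain
    simp only [List.foldl_cons]
    cases rest with
    | nil =>
      have hjv : j + 1 = v := by simpa using hlen
      rw [show pvStepA ⟨d, true, j, sz, ind, 0, lb⟩ c
          = ⟨pvCount d (String.ofList (ind ++ [c])), false, 0, sz, ind ++ [c], 0, lb⟩ by
        simp [pvStepA, h1, h2, h3, hdig, hsz, hjv, pvCount, pv_touch_add]]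
      simp
    | cons c2 rest2 =>
      have hne : j + 1 ≠ v := by
        simp only [List.length_cons] at hlen; push_cast at hlen; omega
      rw [show pvStepA ⟨d, true, j, sz, ind, 0, lb⟩ c
          = ⟨d, true, j + 1, sz, ind ++ [c], 0, lb⟩ by
        simp [pvStepA, h1, h2, h3, hdig, hsz, hne]]
      rw [ih (j + 1) v d sz (ind ++ [c]) lb
        (fun x hm => hall x (List.mem_cons_of_mem _ hm)) hsz
        (by simp only [List.length_cons] at hlen ⊢; push_cast at hlen ⊢; omega)
        (by omega) (by simp)]
      simp

theorem pv_loop_eq : ∀ (n : Nat) (cs : List Char) (seen : Bool) (d : PySem.Dict String Int)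
    (lb : String) (sz ind : List Char),
    pvWfGo n seen cs = true → d.keys.Nodup → (seen = true → d.contains lb = true) →
    (cs.foldl pvStepA ⟨d, false, 0, sz, ind, 0, lb⟩).d = pvLoopB n cs d := by
  intro n
  induction n with
  | zero =>
    intro cs seen d lb sz ind hwf hnd hlb
    cases cs with
    | nil => simp [pvLoopB]
    | cons c rest => simp [pvWfGo] at hwf
  | succ n ih =>
    intro cs seen d lb sz ind hwf hnd hlb
    cases cs with
    | nil => simp [pvLoopB]
    | cons c rest =>
      simp only [pvWfGo] at hwf
      by_cases h1 : c = '+' ∨ c = '-'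
      · rw [if_pos h1] at hwf
        cases hof : PySem.Int.ofChars? (rest.takeWhile PySem.Chars.isdigit) with
        | none => rw [hof] at hwf; simp at hwf
        | some v =>
          rw [hof] at hwf
          simp only [Bool.and_eq_true, decide_eq_true_eq, List.all_eq_true] at hwf
          obtain ⟨⟨⟨h0v, hbl⟩, hall⟩, hwf'⟩ := hwf
          have hvnn : (0 : Int) ≤ v := le_of_lt h0v
          have hdsall : ∀ x ∈ rest.takeWhile PySem.Chars.isdigit,
              PySem.Chars.isdigit x = true := fun x hm => List.mem_takeWhile_imp hm
          have hballs : ∀ x ∈ (rest.drop (rest.takeWhile PySem.Chars.isdigit).length).take v.toNat,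
              pvPlain x = true ∧ PySem.Chars.isdigit x = false := by
            intro x hm
            have := hall x hm
            simp only [Bool.and_eq_true, Bool.not_eq_true'] at this
            exact this
          have hbody_ne : (rest.drop (rest.takeWhile PySem.Chars.isdigit).length).take v.toNat ≠ [] := by
            intro h
            rw [h] at hbl
            simp at hbl
            omega
          have htk : rest.take (rest.takeWhile PySem.Chars.isdigit).length
              = rest.takeWhile PySem.Chars.isdigit :=
            (List.prefix_iff_eq_take.mp (List.takeWhile_prefix _)).symm
          have hrest : rest = rest.takeWhile PySem.Chars.isdigit
              ++ ((rest.drop (rest.takeWhile PySem.Chars.isdigit).length).take v.toNat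
                  ++ rest.drop ((rest.takeWhile PySem.Chars.isdigit).length + v.toNat)) := by
            conv_lhs => rw [← List.take_append_drop (rest.takeWhile PySem.Chars.isdigit).length rest]
            rw [htk]
            congr 1
            conv_lhs => rw [← List.take_append_drop v.toNat
              (rest.drop (rest.takeWhile PySem.Chars.isdigit).length)]
            congr 1
            rw [List.drop_drop, Nat.add_comm]
          have hstep : pvStepA ⟨d, false, 0, sz, ind, 0, lb⟩ c = ⟨d, true, 0, [], [c], 0, lb⟩ := by
            simp [pvStepA, h1]
          have hlen0 : (0 : Int) + (((rest.drop (rest.takeWhile PySem.Chars.isdigit).length).take v.toNat).length : Int) = v := by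
            rw [hbl]; simp [Int.toNat_of_nonneg hvnn]
          have hfold : List.foldl pvStepA ⟨d, true, 0, [], [c], 0, lb⟩ rest
              = List.foldl pvStepA
                  ⟨pvCount d (String.ofList ([c] ++ (rest.drop (rest.takeWhile PySem.Chars.isdigit).length).take v.toNat)),
                   false, 0, rest.takeWhile PySem.Chars.isdigit,
                   [c] ++ (rest.drop (rest.takeWhile PySem.Chars.isdigit).length).take v.toNat, 0, lb⟩
                  (rest.drop ((rest.takeWhile PySem.Chars.isdigit).length + v.toNat)) := by
            conv_lhs => rw [hrest]
            rw [List.foldl_append, List.foldl_append,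
              pv_digits_fold _ hdsall d [] [c] lb]
            simp only [List.nil_append]
            rw [pv_body_fold _ 0 v d _ [c] lb hballs hof hlen0 le_rfl hbody_ne]
          have hrec := ih
            (rest.drop ((rest.takeWhile PySem.Chars.isdigit).length + v.toNat)) seen
            (pvCount d (String.ofList ([c] ++ (rest.drop (rest.takeWhile PySem.Chars.isdigit).length).take v.toNat)))
            lb (rest.takeWhile PySem.Chars.isdigit)
            ([c] ++ (rest.drop (rest.takeWhile PySem.Chars.isdigit).length).take v.toNat)
            hwf' (PySem.Dict.nodup_keys_insert _ _ _ hnd)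
            (fun hs => by rw [pvCount, PySem.Dict.contains_insert]; simp [hlb hs])
          rw [List.foldl_cons, hstep, hfold, hrec]
          have hB : pvLoopB (n + 1) (c :: rest) d
              = pvLoopB n (rest.drop ((rest.takeWhile PySem.Chars.isdigit).length + v.toNat))
                  (pvCount d (String.ofList (c :: (rest.drop (rest.takeWhile PySem.Chars.isdigit).length).take v.toNat))) := by
            simp only [pvLoopB, if_pos h1]
            rw [hof]
          rw [hB]
          simp
      · by_cases h2 : c = '$'
        · rw [if_neg h1, if_pos h2] at hwf
          simp only [Bool.and_eq_true] at hwf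
          obtain ⟨hseen, hwf'⟩ := hwf
          have hstep : pvStepA ⟨d, false, 0, sz, ind, 0, lb⟩ c = ⟨d, false, 0, sz, ind, 0, lb⟩ := by
            subst h2
            show (if ('$' = '+' ∨ '$' = '-') then _ else _) = _
            rw [if_neg h1]
            simp only [pvStepA, pvUseStartEnd, if_true, reduceIte, sub_zero]
            rw [pv_getD_setdefault_zero, pv_setdefault_insert_same,
              pv_insert_getD_self d lb (hlb hseen) hnd]
          rw [List.foldl_cons, hstep]
          rw [ih rest seen d lb sz ind hwf' hnd hlb]
          simp only [pvLoopB, if_neg h1, if_pos h2]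
        · by_cases h3 : c = '^'
          · rw [if_neg h1, if_neg h2, if_pos h3] at hwf
            cases rest with
            | nil =>
              have hstep1 : pvStepA ⟨d, false, 0, sz, ind, 0, lb⟩ c = ⟨d, false, 0, sz, ind, 1, lb⟩ := by
                subst h3
                show (if ('^' = '+' ∨ '^' = '-') then _ else _) = _
                rw [if_neg h1]
                simp [pvStepA]
              rw [List.foldl_cons, hstep1]
              simp only [pvLoopB, if_neg h1, if_neg h2, if_pos h3, List.foldl_nil]
            | cons q rest1 =>
              cases rest1 with
              | nil =>
                simp only [Bool.not_eq_eq_eq_not, Bool.not_true, beq_eq_false_iff_ne, ne_eq] at hwf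
                have hstep1 : pvStepA ⟨d, false, 0, sz, ind, 0, lb⟩ c = ⟨d, false, 0, sz, ind, 1, lb⟩ := by
                  subst h3
                  show (if ('^' = '+' ∨ '^' = '-') then _ else _) = _
                  rw [if_neg h1]
                  simp [pvStepA]
                rw [List.foldl_cons, hstep1]
                have hq : (pvStepA ⟨d, false, 0, sz, ind, 1, lb⟩ q).d = d := by
                  by_cases hq1 : q = '+' ∨ q = '-'
                  · simp [pvStepA, hq1]
                  · by_cases hq3 : q = '^'
                    · subst hq3
                      simp only [pvStepA]
                      rw [if_neg hq1]
                      simp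
                    · simp [pvStepA, hq1, hwf, hq3]
                simp only [List.foldl_cons, List.foldl_nil, hq]
                simp only [pvLoopB, if_neg h1, if_neg h2, if_pos h3]
              | cons b rest' =>
                simp only [Bool.and_eq_true] at hwf
                obtain ⟨⟨hq, hb⟩, hwf'⟩ := hwf
                obtain ⟨hq1, hq2, hq3⟩ := pv_plain_facts hq
                obtain ⟨hb1, hb2, hb3⟩ := pv_plain_facts hb
                have hstep1 : pvStepA ⟨d, false, 0, sz, ind, 0, lb⟩ c = ⟨d, false, 0, sz, ind, 1, lb⟩ := by
                  subst h3
                  show (if ('^' = '+' ∨ '^' = '-') then _ else _) = _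
                  rw [if_neg h1]
                  simp [pvStepA]
                have hstep2 : pvStepA ⟨d, false, 0, sz, ind, 1, lb⟩ q = ⟨d, false, 0, sz, ind, 2, lb⟩ := by
                  simp [pvStepA, hq1, hq2, hq3]
                have hstep3 : pvStepA ⟨d, false, 0, sz, ind, 2, lb⟩ b
                    = ⟨pvCount d (String.ofList [b]), false, 0, sz, ind, 0, lb⟩ := by
                  simp [pvStepA, hb1, hb2, hb3, pvCount, pv_touch_add, pvUseStartEnd]
                rw [List.foldl_cons, List.foldl_cons, List.foldl_cons, hstep1, hstep2, hstep3]
                rw [ih rest' seen (pvCount d (String.ofList [b])) lb sz ind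
                  hwf' (PySem.Dict.nodup_keys_insert _ _ _ hnd)
                  (fun hs => by rw [pvCount, PySem.Dict.contains_insert]; simp [hlb hs])]
                simp only [pvLoopB, if_neg h1, if_neg h2, if_pos h3]
          · rw [if_neg h1, if_neg h2, if_neg h3] at hwf
            have hstep : pvStepA ⟨d, false, 0, sz, ind, 0, lb⟩ c
                = ⟨pvCount d (String.ofList [c]), false, 0, sz, ind, 0, String.ofList [c]⟩ := by
              simp [pvStepA, h1, h2, h3, pvCount, pv_touch_add]
            rw [List.foldl_cons, hstep]
            rw [ih rest true (pvCount d (String.ofList [c]))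
              (String.ofList [c]) sz ind hwf (PySem.Dict.nodup_keys_insert _ _ _ hnd)
              (fun _ => by rw [pvCount]; exact PySem.Dict.contains_insert_self _ _ _)]
            simp only [pvLoopB, if_neg h1, if_neg h2, if_neg h3]

-- ===== VERDICT (by name: the statement is the Claim_ definition above) =====
theorem pileup_to_freq_spec : Claim_equal_pileup_to_freq := by
  intro reference pileup _ hpre
  show _ = _
  unfold pileup_to_freq pileup_to_freq_alt
  have heq :=
    pv_loop_eq (PySem.Str.upper pileup).toList.length (PySem.Str.upper pileup).toList false
      PySem.Dict.empty "" [] [] hpre PySem.Dict.nodup_keys_empty (by simp)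
  simp only [heq]
  exact pv_final _ reference
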